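-- pv_equiv track=rewrite | github.com/bolabaden/rhythm-vibe-mcp | src/rhythm_vibe_mcp/theory/legacy.py | mirror_chord
-- ===== SOURCE A (Python) =====
-- def mirror_chord(
--     chord_pitches: list[int],
--     axis_root1: int,
--     axis_root2: int,
-- ) -> list[int]:
--     """Inverts a list of pitches. Converts major harmony into minor, and
--     dominant 7th chords into half-diminished/minor-6th geometries.
--
--     Args:
--     ----
--         chord_pitches (Any): The chord_pitches argument.
--         axis_root1 (int): The axis_root1 argument.
--         axis_root2 (int): The axis_root2 argument.
--
--     Returns:
--     -------
--         None: The return value.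
--
--     Processing Logic:
--     -------------------
--         - Executes the logic for mirror_chord
--
--     """
--     """
--     Inverts a list of pitches. Converts major harmony into minor, and
--     dominant 7th chords into half-diminished/minor-6th geometries.
--     """
--     return sorted([(axis_root1 + axis_root2 - p) % 12 for p in chord_pitches])
-- ===== SOURCE B (Python) =====
-- def mirror_chord(
--     chord_pitches: list[int],
--     axis_root1: int,
--     axis_root2: int,
-- ) -> list[int]:
--     """Reflect each pitch about the axis mod 12, then counting-sort over the
--     fixed range [0, 12) instead of calling sorted."""
--     counts = [0] * 12
--     s = axis_root1 + axis_root2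
--     for p in chord_pitches:
--         counts[(s - p) % 12] += 1
--     result = []
--     for v in range(12):
--         result.extend([v] * counts[v])
--     return result
-- ===== Notes on version B (the rewrite author's own statement) =====
-- stated objective: alternative
-- what changed: Replaces map-then-sorted with a counting sort over the fixed mod-12 range: one pass fills a 12-slot count array, then the result is emitted in order by repeating each residue count times.
import Mathlib
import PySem

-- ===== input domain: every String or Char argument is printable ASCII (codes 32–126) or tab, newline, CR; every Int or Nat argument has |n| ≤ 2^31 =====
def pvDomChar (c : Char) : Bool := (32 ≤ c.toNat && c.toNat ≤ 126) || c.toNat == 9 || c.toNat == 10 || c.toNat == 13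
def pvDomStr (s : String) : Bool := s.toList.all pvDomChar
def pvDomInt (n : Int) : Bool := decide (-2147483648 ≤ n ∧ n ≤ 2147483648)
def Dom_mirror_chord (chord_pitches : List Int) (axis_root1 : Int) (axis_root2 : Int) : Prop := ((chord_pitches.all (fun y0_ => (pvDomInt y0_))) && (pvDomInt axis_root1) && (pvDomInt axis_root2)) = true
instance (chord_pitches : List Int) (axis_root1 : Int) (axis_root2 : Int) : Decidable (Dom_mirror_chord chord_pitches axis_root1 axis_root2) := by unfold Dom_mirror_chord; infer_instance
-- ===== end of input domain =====

-- B replaces map-then-sorted with a counting sort over the fixed mod-12 range (alternative decomposition).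

-- ===== PORT A =====
def mirror_chord (chord_pitches : List Int) (axis_root1 : Int) (axis_root2 : Int) : List Int :=
  PySem.List.sorted (chord_pitches.map (fun p => PySem.Int.mod (axis_root1 + axis_root2 - p) 12)) (fun x => x) false

-- ===== PORT B =====
def mirror_chord_alt (chord_pitches : List Int) (axis_root1 : Int) (axis_root2 : Int) : List Int :=
  let s := axis_root1 + axis_root2
  let counts := chord_pitches.foldl
    (fun c p => c.modify (PySem.Int.mod (s - p) 12).toNat (fun x => x + 1))
    (List.replicate 12 (0 : Int))
  (PySem.List.pyRange 0 12 1).foldl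
    (fun res v => res ++ List.replicate (PySem.List.pyGetD counts v 0).toNat v) []

-- ===== PRECONDITION & SPEC =====
def Spec_mirror_chord (chord_pitches : List Int) (axis_root1 : Int) (axis_root2 : Int) (out : List Int) : Prop := out = mirror_chord_alt chord_pitches axis_root1 axis_root2
instance (chord_pitches : List Int) (axis_root1 : Int) (axis_root2 : Int) (out : List Int) : Decidable (Spec_mirror_chord chord_pitches axis_root1 axis_root2 out) := by unfold Spec_mirror_chord; infer_instance

-- ===== CLAIM (what is proved, stated in full; the proofs are below) =====
def Claim_equal_mirror_chord : Prop := ∀ (chord_pitches : List Int) (axis_root1 : Int) (axis_root2 : Int), Dom_mirror_chord chord_pitches axis_root1 axis_root2 → Spec_mirror_chord chord_pitches axis_root1 axis_root2 (mirror_chord chord_pitches axis_root1 axis_root2)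

-- ===== LEMMAS AND PROOFS =====

-- the count array built by B's first loop holds the multiplicity of each residue
theorem counts_getD (ms : List Int) (hms : ∀ m ∈ ms, 0 ≤ m ∧ m < 12) :
    ∀ (c : List Int), c.length = 12 → ∀ j : Nat, j < 12 →
      ((ms.foldl (fun c m => c.modify m.toNat (fun x => x + 1)) c).getD j 0)
        = c.getD j 0 + (ms.count (j : Int) : Int) := by
  induction ms with
  | nil => intro c hc j hj; simp
  | cons m t ih =>
    intro c hc j hj
    have hm := hms m (by simp)
    have ht : ∀ x ∈ t, 0 ≤ x ∧ x < 12 := fun x hx => hms x (by simp [hx])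
    have hlen : (c.modify m.toNat (fun x => x + 1)).length = 12 := by
      simp [hc]
    have step := ih ht (c.modify m.toNat (fun x => x + 1)) hlen j hj
    simp only [List.foldl_cons]
    rw [step]
    have hmn : m.toNat < 12 := by omega
    by_cases h : m.toNat = j
    · have hmj : m = (j : Int) := by omega
      have : (c.modify m.toNat (fun x => x + 1)).getD j 0 = c.getD j 0 + 1 := by
        subst h
        rw [List.getD_eq_getElem?_getD, List.getD_eq_getElem?_getD,
          List.getElem?_modify]
        have : m.toNat < c.length := by omega
        simp [List.getElem?_eq_getElem this]
      rw [this, hmj]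
      simp
      ring
    · have hneq : m ≠ (j : Int) := by omega
      have : (c.modify m.toNat (fun x => x + 1)).getD j 0 = c.getD j 0 := by
        rw [List.getD_eq_getElem?_getD, List.getD_eq_getElem?_getD,
          List.getElem?_modify]
        simp [h]
      rw [this]
      simp [hneq]

-- counting a value in B's emission order
theorem count_flatMap_replicate (ms : List Int) :
    ∀ (L : List Int), L.Nodup → ∀ w : Int,
      (L.flatMap (fun v => List.replicate (ms.count v) v)).count w
        = if w ∈ L then ms.count w else 0 := by
  intro L
  induction L with
  | nil => intro _ w; simp
  | cons v t ih =>
    intro hnd w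
    have hnd' : t.Nodup := hnd.of_cons
    have hv : v ∉ t := by simp_all [List.nodup_cons]
    simp only [List.flatMap_cons, List.count_append, ih hnd', List.count_replicate]
    by_cases h : w = v
    · subst h; simp [hv]
    · simp [h, Ne.symm h]

-- B's emission order is sorted
theorem pairwise_flatMap_replicate (ms : List Int) :
    ((PySem.List.pyRange 0 12 1).flatMap
      (fun v => List.replicate (ms.count v) v)).Pairwise (· ≤ ·) := by
  rw [List.flatMap_def, List.pairwise_flatten]
  constructor
  · intro l hl
    simp only [List.mem_map] at hl
    obtain ⟨v, _, rfl⟩ := hl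
    exact List.pairwise_replicate.mpr (Or.inr le_rfl)
  · have := PySem.List.pairwise_lt_pyRange_one (a := 0) (b := 12)
    refine List.Pairwise.map _ ?_ this
    intro a b hab x hx y hy
    rw [List.eq_of_mem_replicate hx, List.eq_of_mem_replicate hy]
    exact le_of_lt hab

-- ===== VERDICT (by name: the statement is the Claim_ definition above) =====
theorem mirror_chord_spec : Claim_equal_mirror_chord := by
  intro cp a1 a2 _
  unfold Spec_mirror_chord mirror_chord mirror_chord_alt
  set ms := cp.map (fun p => PySem.Int.mod (a1 + a2 - p) 12) with hms_def
  have hms : ∀ m ∈ ms, 0 ≤ m ∧ m < 12 := by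
    intro m hm
    rw [hms_def] at hm
    simp only [List.mem_map] at hm
    obtain ⟨p, _, rfl⟩ := hm
    exact ⟨PySem.Int.mod_nonneg _ (by norm_num), PySem.Int.mod_lt _ (by norm_num)⟩
  -- B's first loop over cp equals a loop over ms
  have hfold : cp.foldl
      (fun c p => c.modify (PySem.Int.mod (a1 + a2 - p) 12).toNat (fun x => x + 1))
      (List.replicate 12 (0 : Int))
      = ms.foldl (fun c m => c.modify m.toNat (fun x => x + 1))
          (List.replicate 12 (0 : Int)) := by
    rw [hms_def, List.foldl_map]
  set counts := cp.foldl
      (fun c p => c.modify (PySem.Int.mod (a1 + a2 - p) 12).toNat (fun x => x + 1))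
      (List.replicate 12 (0 : Int)) with hcounts_def
  have hcget : ∀ j : Nat, j < 12 → counts.getD j 0 = (ms.count (j : Int) : Int) := by
    intro j hj
    rw [hfold, counts_getD ms hms _ (by simp) j hj]
    simp only [List.getD_eq_getElem?_getD, List.getElem?_replicate]
    simp [hj]
  -- B's second loop is a flatMap
  rw [PySem.List.foldl_append_eq_flatMap]
  have hrepl : ∀ v ∈ PySem.List.pyRange 0 12 1,
      List.replicate (PySem.List.pyGetD counts v 0).toNat v
        = List.replicate (ms.count v) v := by
    intro v hv
    rw [PySem.List.mem_pyRange_one] at hv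
    have h0 : 0 ≤ v := hv.1
    have h12 : v < 12 := hv.2
    have hjn : v.toNat < 12 := by omega
    have : PySem.List.pyGetD counts v 0 = counts.getD v.toNat 0 :=
      PySem.List.pyGetD_of_nonneg _ _ h0
    rw [this, hcget v.toNat hjn]
    have : ((v.toNat : Int)) = v := by omega
    rw [this]
    simp
  rw [List.flatMap_congr hrepl]
  -- sorted ms = the flatMap, by perm + pairwise
  apply PySem.List.sorted_id_eq_of_perm_of_pairwise
  · rw [List.perm_iff_count]
    intro w
    simp only [List.nil_append]
    rw [count_flatMap_replicate ms _ (PySem.List.nodup_pyRange_one _ _) w]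
    by_cases h : w ∈ PySem.List.pyRange 0 12 1
    · simp [h]
    · simp only [h, if_false]
      rw [PySem.List.mem_pyRange_one] at h
      push Not at h
      symm
      rw [List.count_eq_zero]
      intro hw
      have := hms w hw
      omega
  · exact pairwise_flatMap_replicate ms
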